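-- pv_equiv track=rewrite | github.com/9527-csroad/Doc-Similarity | extract_dataset_texts.py | collect_repeated_short_lines
-- ===== SOURCE A (Python) =====
-- from collections import Counter
-- from typing import Dict, List, Tuple
--
-- def collect_repeated_short_lines(
--     page_texts: List[str], max_len: int = 60, min_repeat: int = 30
-- ) -> set[str]:
--     lines = []
--     for text in page_texts:
--         for line in (text or "").splitlines():
--             line = line.strip()
--             if not line:
--                 continue
--             if len(line) <= max_len:
--                 lines.append(line)
--     counter = Counter(lines)
--     return {line for line, cnt in counter.items() if cnt >= min_repeat}
-- ===== SOURCE B (Python) =====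
-- def collect_repeated_short_lines(page_texts, max_len=60, min_repeat=30):
--     lines = [ln for text in page_texts
--              for ln in map(str.strip, (text or "").splitlines())
--              if ln and len(ln) <= max_len]
--     # Sort-then-scan frequency count: equal lines are contiguous in the sorted
--     # list, so each run's length is that line's total count (no hash counting).
--     ordered = sorted(lines)
--     n = len(ordered)
--     counts = {}
--     i = 0
--     while i < n:
--         j = i + 1
--         while j < n and ordered[j] == ordered[i]:
--             j += 1
--         counts[ordered[i]] = j - i
--         i = j
--     return {ln for ln in lines if counts.get(ln, 0) >= min_repeat}
-- ===== Notes on version B (the rewrite author's own statement) =====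
-- stated objective: alternative
-- what changed: B counts line frequencies by sorting the collected short lines and run-length scanning the sorted list with two indices (equal lines are contiguous, so each run's length is that line's total count), recording run lengths in a plain dict, instead of A's Counter hash aggregation over an items() scan; the collection step is a flat comprehension.
import Mathlib
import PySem

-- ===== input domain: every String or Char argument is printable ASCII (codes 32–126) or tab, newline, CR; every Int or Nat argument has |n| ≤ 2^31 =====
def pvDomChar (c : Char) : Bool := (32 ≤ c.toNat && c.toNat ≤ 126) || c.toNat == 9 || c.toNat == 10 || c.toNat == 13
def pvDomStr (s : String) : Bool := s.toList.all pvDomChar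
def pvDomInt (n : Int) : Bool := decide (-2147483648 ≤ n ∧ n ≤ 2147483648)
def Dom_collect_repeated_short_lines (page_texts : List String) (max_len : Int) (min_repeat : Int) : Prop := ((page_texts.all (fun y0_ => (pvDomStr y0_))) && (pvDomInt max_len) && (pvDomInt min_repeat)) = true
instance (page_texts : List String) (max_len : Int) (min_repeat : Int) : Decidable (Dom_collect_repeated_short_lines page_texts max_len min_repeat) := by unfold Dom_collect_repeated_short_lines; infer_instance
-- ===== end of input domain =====

-- B counts line frequencies by sorting the short lines and run-length scanning the sorted
-- list instead of A's Counter hash aggregation; objective: alternative algorithm.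

-- ===== PORT A =====
def collect_repeated_short_lines (page_texts : List String) (max_len : Int) (min_repeat : Int) : List String :=
  let lines : List String :=
    page_texts.foldl (fun acc text =>
      -- for line in (text or "").splitlines():  ((text or "") = text for a str argument: "" or "" == "")
      (PySem.Str.splitlines text).foldl (fun acc line =>
        let line := PySem.Str.strip line
        if line = "" then acc                                  -- if not line: continue
        else if PySem.Str.len line ≤ max_len then acc ++ [line]
        else acc) acc) []
  let counter := PySem.Dict.counter lines
  -- {line for line, cnt in counter.items() if cnt >= min_repeat}
  counter.items.foldl (fun s p => if p.2 ≥ min_repeat then PySem.Set.add s p.1 else s) PySem.Set.empty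

-- ===== PORT B =====
-- the filtered line comprehension of Source B, per text
def pvShortLines (max_len : Int) (text : String) : List String :=
  ((PySem.Str.splitlines text).map PySem.Str.strip).filter
    (fun s => !(s == "") && decide (PySem.Str.len s ≤ max_len))

-- inner loop: k = 1; while k < len(rest) and rest[k] == head: k += 1
def pvRunLen (rest : List String) (head : String) (k : Nat) : Nat :=
  if h : k < rest.length then
    if rest[k] = head then pvRunLen rest head (k+1) else k
  else k
termination_by rest.length - k

lemma pvRunLen_le (rest : List String) (head : String) : ∀ k, k ≤ pvRunLen rest head k := by
  intro k
  induction hk : rest.length - k generalizing k with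
  | zero => unfold pvRunLen; split <;> [omega; exact le_refl k]
  | succ n ih =>
    unfold pvRunLen; split
    · split
      · exact le_trans (Nat.le_succ k) (ih (k+1) (by omega))
      · exact le_refl k
    · exact le_refl k

-- outer loop: i = 0; while i < n: find the run end j, record counts[ordered[i]] = j - i, i = j
def pvCountRuns (ordered : List String) (i : Nat) (counts : PySem.Dict String Int) : PySem.Dict String Int :=
  if h : i < ordered.length then
    let j := pvRunLen ordered ordered[i] (i+1)
    pvCountRuns ordered j (counts.insert ordered[i] ((j - i : Nat) : Int))
  else counts
termination_by ordered.length - i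
decreasing_by
  have := pvRunLen_le ordered ordered[i] (i+1)
  omega

def collect_repeated_short_lines_alt (page_texts : List String) (max_len : Int) (min_repeat : Int) : List String :=
  let lines : List String := page_texts.flatMap (fun t => pvShortLines max_len t)
  let counts := pvCountRuns (PySem.List.sorted lines (fun x => x) false) 0 PySem.Dict.empty
  -- {ln for ln in lines if counts.get(ln, 0) >= min_repeat}
  lines.foldl (fun st ln =>
    if counts.getD ln 0 ≥ min_repeat then PySem.Set.add st ln else st) PySem.Set.empty

-- ===== PRECONDITION & SPEC =====
def Spec_collect_repeated_short_lines (page_texts : List String) (max_len : Int) (min_repeat : Int) (out : List String) : Prop := out = collect_repeated_short_lines_alt page_texts max_len min_repeat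
instance (page_texts : List String) (max_len : Int) (min_repeat : Int) (out : List String) : Decidable (Spec_collect_repeated_short_lines page_texts max_len min_repeat out) := by unfold Spec_collect_repeated_short_lines; infer_instance

-- ===== CLAIM (what is proved, stated in full; the proofs are below) =====
def Claim_equal_collect_repeated_short_lines : Prop := ∀ (page_texts : List String) (max_len : Int) (min_repeat : Int), Dom_collect_repeated_short_lines page_texts max_len min_repeat → Spec_collect_repeated_short_lines page_texts max_len min_repeat (collect_repeated_short_lines page_texts max_len min_repeat)

-- ===== LEMMAS AND PROOFS =====

-- updating a set with elements it already has is a no-op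
lemma pv_update_of_subset {α : Type} [BEq α] [LawfulBEq α] :
    ∀ (l : List α) (t : PySem.Set α), (∀ y ∈ l, y ∈ t) → PySem.Set.update t l = t := by
  intro l
  induction l with
  | nil => intro t _; exact PySem.Set.update_nil t
  | cons x l ih =>
    intro t h
    rw [PySem.Set.update_cons, PySem.Set.add_of_mem (h x (List.mem_cons_self))]
    exact ih t (fun y hy => h y (List.mem_cons_of_mem _ hy))

-- conditionally inserting along the deduplicated list gives the same set, in the same
-- order, as conditionally inserting along the original list (insertion is idempotent)
lemma pv_update_filter_update {α : Type} [BEq α] [LawfulBEq α] (P : α → Bool) :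
    ∀ (xs s t : List α), (∀ y, y ∈ s → P y = true → y ∈ t) →
      PySem.Set.update t ((PySem.Set.update s xs).filter P) =
        PySem.Set.update t (xs.filter P) := by
  intro xs
  induction xs with
  | nil =>
    intro s t h
    rw [PySem.Set.update_nil, List.filter_nil, PySem.Set.update_nil]
    exact pv_update_of_subset _ t (fun y hy => h y (List.mem_of_mem_filter hy) (List.of_mem_filter hy))
  | cons x xs ih =>
    intro s t h
    rw [PySem.Set.update_cons]
    by_cases hx : x ∈ s
    · rw [PySem.Set.add_of_mem hx, ih s t h]
      by_cases hp : P x = true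
      · rw [List.filter_cons_of_pos hp, PySem.Set.update_cons, PySem.Set.add_of_mem (h x hx hp)]
      · rw [List.filter_cons_of_neg (by simpa using hp)]
    · rw [PySem.Set.add_of_not_mem hx]
      by_cases hp : P x = true
      · by_cases hxt : x ∈ t
        · have h' : ∀ y, y ∈ s ++ [x] → P y = true → y ∈ t := by
            intro y hy hPy
            rcases List.mem_append.mp hy with hy | hy
            · exact h y hy hPy
            · simpa [List.mem_singleton.mp hy] using hxt
          rw [ih (s ++ [x]) t h', List.filter_cons_of_pos hp, PySem.Set.update_cons,
            PySem.Set.add_of_mem hxt]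
        · have h' : ∀ y, y ∈ s ++ [x] → P y = true → y ∈ t ++ [x] := by
            intro y hy hPy
            rcases List.mem_append.mp hy with hy | hy
            · exact List.mem_append.mpr (Or.inl (h y hy hPy))
            · exact List.mem_append.mpr (Or.inr hy)
          have hIH := ih (s ++ [x]) (t ++ [x]) h'
          have hE := PySem.Set.update_eq_append_filter (s ++ [x]) xs
          set δ : List α := List.filter (fun y => !(PySem.Set.contains (s ++ [x]) y)) (PySem.Set.ofList xs) with hδ
          have hred : ∀ u : List α, (∀ y ∈ s, P y = true → y ∈ u) →
              PySem.Set.update u (((s ++ [x]) ++ δ).filter P) =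
                PySem.Set.update (PySem.Set.update u [x]) (δ.filter P) := by
            intro u hu
            rw [List.filter_append, List.filter_append, List.filter_cons_of_pos hp,
              List.filter_nil, PySem.Set.update_append, PySem.Set.update_append,
              pv_update_of_subset (s.filter P) u
                (fun y hy => hu y (List.mem_of_mem_filter hy) (List.of_mem_filter hy))]
          have hL : PySem.Set.update t ((PySem.Set.update (s ++ [x]) xs).filter P) =
              PySem.Set.update (PySem.Set.update t [x]) (δ.filter P) := by
            rw [hE]; exact hred t (fun y hy hPy => h y hy hPy)
          have hR : PySem.Set.update (t ++ [x]) ((PySem.Set.update (s ++ [x]) xs).filter P) =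
              PySem.Set.update (PySem.Set.update (t ++ [x]) [x]) (δ.filter P) := by
            rw [hE]
            exact hred (t ++ [x]) (fun y hy hPy => List.mem_append.mpr (Or.inl (h y hy hPy)))
          have hupd1 : PySem.Set.update t [x] = t ++ [x] := by
            rw [PySem.Set.update_cons, PySem.Set.update_nil, PySem.Set.add_of_not_mem hxt]
          have hupd2 : PySem.Set.update (t ++ [x]) [x] = t ++ [x] := by
            rw [PySem.Set.update_cons, PySem.Set.update_nil,
              PySem.Set.add_of_mem (List.mem_append.mpr (Or.inr (List.mem_singleton_self x)))]
          rw [hL, hupd1, List.filter_cons_of_pos hp, PySem.Set.update_cons,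
            PySem.Set.add_of_not_mem hxt, ← hIH, hR, hupd2]
      · have h' : ∀ y, y ∈ s ++ [x] → P y = true → y ∈ t := by
          intro y hy hPy
          rcases List.mem_append.mp hy with hy | hy
          · exact h y hy hPy
          · exact absurd (List.mem_singleton.mp hy ▸ hPy) hp
        rw [ih (s ++ [x]) t h', List.filter_cons_of_neg (by simpa using hp)]

-- A's nested collection loop produces exactly B's flat list of short lines
lemma pv_lines_eq (page_texts : List String) (max_len : Int) :
    page_texts.foldl (fun acc text =>
      (PySem.Str.splitlines text).foldl (fun acc line =>
        let line := PySem.Str.strip line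
        if line = "" then acc
        else if PySem.Str.len line ≤ max_len then acc ++ [line]
        else acc) acc) [] =
    page_texts.flatMap (fun t => pvShortLines max_len t) := by
  have hinner : ∀ (acc : List String) (text : String),
      (PySem.Str.splitlines text).foldl (fun acc line =>
        let line := PySem.Str.strip line
        if line = "" then acc
        else if PySem.Str.len line ≤ max_len then acc ++ [line]
        else acc) acc = acc ++ pvShortLines max_len text := by
    intro acc text
    have hbody : (fun (acc : List String) (line : String) =>
        let line := PySem.Str.strip line
        if line = "" then acc
        else if PySem.Str.len line ≤ max_len then acc ++ [line]
        else acc) =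
        (fun (acc : List String) (line : String) =>
          if ((fun s => !(s == "") && decide (PySem.Str.len s ≤ max_len)) ∘ PySem.Str.strip) line = true
          then acc ++ [PySem.Str.strip line] else acc) := by
      funext acc line
      by_cases h1 : PySem.Str.strip line = ""
      · simp [h1]
      · have hc : ((fun s => !(s == "") && decide (PySem.Str.len s ≤ max_len)) ∘
            PySem.Str.strip) line = decide (PySem.Str.len (PySem.Str.strip line) ≤ max_len) := by
          simp [Function.comp, h1]
        rw [if_neg h1, hc]
        by_cases h2 : PySem.Str.len (PySem.Str.strip line) ≤ max_len
        · rw [if_pos h2, if_pos (decide_eq_true h2)]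
        · rw [if_neg h2, if_neg (by simpa using h2)]
    rw [hbody, PySem.List.foldl_append_if _ PySem.Str.strip]
    unfold pvShortLines
    rw [List.filter_map]
  calc page_texts.foldl (fun acc text =>
      (PySem.Str.splitlines text).foldl (fun acc line =>
        let line := PySem.Str.strip line
        if line = "" then acc
        else if PySem.Str.len line ≤ max_len then acc ++ [line]
        else acc) acc) []
      = page_texts.foldl (fun acc text => acc ++ pvShortLines max_len text) [] := by
        exact PySem.List.foldl_congr_mem _ _ _ _ (fun acc x _ => hinner acc x)
    _ = page_texts.flatMap (fun t => pvShortLines max_len t) := by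
        rw [PySem.List.foldl_append_eq_flatMap]; rfl

-- the fold of 'if cnt ≥ m then add' is 'update with the filtered list'
lemma pv_fold_eq_update (lines : List String) (m : Int) (L : List String) :
    L.foldl (fun s k => if (List.count k lines : Int) ≥ m then PySem.Set.add s k else s)
      PySem.Set.empty =
    PySem.Set.update [] (L.filter (fun k => decide ((List.count k lines : Int) ≥ m))) := by
  have hbody : (fun (s : PySem.Set String) (k : String) =>
      if (List.count k lines : Int) ≥ m then PySem.Set.add s k else s) =
      (fun (s : PySem.Set String) (k : String) =>
        if decide ((List.count k lines : Int) ≥ m) = true then PySem.Set.add s k else s) := by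
    funext s k
    by_cases hc : (List.count k lines : Int) ≥ m
    · rw [if_pos hc, if_pos (decide_eq_true hc)]
    · rw [if_neg hc, if_neg (by simpa using hc)]
  rw [hbody, ← List.foldl_filter]
  rfl

-- folding over the deduplicated key list (A) equals folding over all lines
lemma pv_count_set (lines : List String) (m : Int) :
    (PySem.Set.ofList lines).foldl
      (fun s k => if (List.count k lines : Int) ≥ m then PySem.Set.add s k else s)
      PySem.Set.empty =
    lines.foldl
      (fun st ln => if (List.count ln lines : Int) ≥ m then PySem.Set.add st ln else st)
      PySem.Set.empty := by
  rw [pv_fold_eq_update lines m, pv_fold_eq_update lines m lines]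
  exact pv_update_filter_update
    (fun k => decide ((List.count k lines : Int) ≥ m)) lines [] []
    (by intro y hy; simp at hy)

-- the inner while loop counts the run of `head` from index k
lemma pv_runLen_eq (head : String) :
    ∀ (rest : List String) (k : Nat),
      pvRunLen rest head k = k + ((rest.drop k).takeWhile (fun x => x == head)).length := by
  intro rest k
  induction hk : rest.length - k generalizing k with
  | zero =>
    unfold pvRunLen
    rw [dif_neg (by omega), List.drop_of_length_le (by omega)]
    simp
  | succ n ih =>
    have hlt : k < rest.length := by omega
    unfold pvRunLen
    rw [dif_pos hlt]
    have hdrop : rest.drop k = rest[k] :: rest.drop (k+1) :=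
      List.drop_eq_getElem_cons hlt
    by_cases he : rest[k] = head
    · rw [if_pos he, ih (k+1) (by omega), hdrop, List.takeWhile_cons_of_pos (by simp [he])]
      simp; omega
    · rw [if_neg he, hdrop, List.takeWhile_cons_of_neg (by simp [he])]
      simp

-- a sorted list's tail, once the leading run of `head` is dropped, no longer contains `head`
lemma pv_head_not_mem_dropWhile (head : String) (t : List String)
    (hsort_t : t.Pairwise (· ≤ ·)) (hle : ∀ y ∈ t, head ≤ y) :
    head ∉ t.dropWhile (fun x => x == head) := by
  intro hmem
  cases hd : t.dropWhile (fun x => x == head) with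
  | nil => rw [hd] at hmem; simp at hmem
  | cons b rs =>
    rw [hd] at hmem
    have hb : ¬ (b == head) = true := by
      have := List.head_dropWhile_not (p := fun x => x == head) (l := t)
        (by rw [hd]; simp)
      simpa [hd] using this
    have hbt : b ∈ t := (List.dropWhile_sublist (fun x => x == head)).mem
      (by rw [hd]; exact List.mem_cons_self)
    have hble : head ≤ b := hle b hbt
    have hsrem : (b :: rs).Pairwise (· ≤ ·) := by
      have := List.Pairwise.sublist (List.dropWhile_sublist (fun x => x == head)) hsort_t
      rwa [hd] at this
    rcases List.mem_cons.mp hmem with h1 | h1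
    · exact hb (by simp [h1])
    · have h2 : b ≤ head := (List.pairwise_cons.mp hsrem).1 head h1
      exact hb (by simp [le_antisymm h2 hble])

-- run-length scan of a sorted list: each key recorded from index i on gets its count in the suffix
lemma pv_countRuns_getD (l : List String) (hsort : l.Pairwise (· ≤ ·)) :
    ∀ (i : Nat) (counts : PySem.Dict String Int) (s : String),
      (pvCountRuns l i counts).getD s 0 =
        if s ∈ l.drop i then ((l.drop i).count s : Int) else counts.getD s 0 := by
  intro i
  induction hm : l.length - i using Nat.strong_induction_on generalizing i with
  | _ n ih =>
  intro counts s
  by_cases h : i < l.length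
  · have hd : l.drop i = l[i] :: l.drop (i+1) := List.drop_eq_getElem_cons h
    have hrun := pv_runLen_eq l[i] l (i+1)
    generalize hr : List.takeWhile (fun x => x == l[i]) (l.drop (i+1)) = r at *
    generalize hrm : List.dropWhile (fun x => x == l[i]) (l.drop (i+1)) = rem at *
    have htk : l.drop (i+1) = r ++ rem := by
      rw [← hr, ← hrm, List.takeWhile_append_dropWhile]
    have hk : pvRunLen l l[i] (i+1) = i + 1 + r.length := by omega
    have hdropj : l.drop (i + 1 + r.length) = rem := by
      have h1 : l.drop (i + 1 + r.length) = (l.drop (i+1)).drop r.length := by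
        rw [List.drop_drop]
      rw [h1, htk, List.drop_left]
    have hsort_di : (l.drop i).Pairwise (· ≤ ·) :=
      List.Pairwise.sublist (List.drop_sublist i l) hsort
    rw [hd] at hsort_di
    have hsort_t : (l.drop (i+1)).Pairwise (· ≤ ·) := (List.pairwise_cons.mp hsort_di).2
    have hle : ∀ y ∈ l.drop (i+1), l[i] ≤ y := (List.pairwise_cons.mp hsort_di).1
    have hsort_rem : rem.Pairwise (· ≤ ·) := by
      rw [htk] at hsort_t; exact (List.pairwise_append.mp hsort_t).2.1
    have hrall : ∀ x ∈ r, x = l[i] := by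
      intro x hx
      have := List.mem_takeWhile_imp (l := l.drop (i+1)) (p := fun x => x == l[i])
        (by rw [hr]; exact hx)
      simpa using this
    have hheadnotin : l[i] ∉ rem := by
      rw [← hrm]
      exact pv_head_not_mem_dropWhile l[i] (l.drop (i+1)) hsort_t hle
    have hcount_rem_head : rem.count l[i] = 0 := List.count_eq_zero.mpr hheadnotin
    -- unfold one step of pvCountRuns
    have hstep : pvCountRuns l i counts =
        pvCountRuns l (i + 1 + r.length)
          (counts.insert l[i] (((i + 1 + r.length) - i : Nat) : Int)) := by
      conv_lhs => rw [pvCountRuns]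
      rw [dif_pos h]
      rw [hk]
    rw [hstep, ih (l.length - (i + 1 + r.length)) (by omega) (i + 1 + r.length) rfl]
    rw [hdropj]
    have hsub : ((i + 1 + r.length) - i : Nat) = 1 + r.length := by omega
    rw [hsub]
    by_cases hsrem : s ∈ rem
    · have hst : s ∈ l.drop i := by
        rw [hd, htk]
        exact List.mem_cons_of_mem _ (List.mem_append.mpr (Or.inr hsrem))
      rw [if_pos hsrem, if_pos hst]
      have hsne : s ≠ l[i] := fun hq => hheadnotin (hq ▸ hsrem)
      have hcr : (r.count s) = 0 := List.count_eq_zero.mpr (fun hq => hsne (hrall s hq))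
      rw [hd, List.count_cons, htk, List.count_append, hcr]
      simp [Ne.symm hsne]
    · rw [if_neg hsrem]
      by_cases hsh : s = l[i]
      · rw [hsh, if_pos (by rw [hd]; exact List.mem_cons_self), PySem.Dict.getD_insert_self]
        have hcnt : (l.drop i).count l[i] = 1 + r.length := by
          rw [hd, List.count_cons, htk, List.count_append, hcount_rem_head]
          have : r.count l[i] = r.length := List.count_eq_length.mpr (by
            intro x hx; simp [hrall x hx])
          simp [this]; omega
        rw [hcnt]
      · have hsnott : s ∉ l.drop i := by
          intro hmem
          rw [hd] at hmem
          rcases List.mem_cons.mp hmem with h1 | h1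
          · exact hsh h1
          · rw [htk] at h1
            rcases List.mem_append.mp h1 with h2 | h2
            · exact hsh (hrall s h2)
            · exact hsrem h2
        rw [if_neg hsnott, PySem.Dict.getD_insert_of_ne counts _ _ hsh]
  · rw [pvCountRuns, dif_neg h, List.drop_of_length_le (by omega)]
    simp

-- ===== VERDICT (by name: the statement is the Claim_ definition above) =====
theorem collect_repeated_short_lines_spec : Claim_equal_collect_repeated_short_lines := by
  intro page_texts max_len min_repeat _
  unfold Spec_collect_repeated_short_lines
  unfold collect_repeated_short_lines collect_repeated_short_lines_alt
  rw [pv_lines_eq page_texts max_len]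
  set lines : List String := page_texts.flatMap (fun t => pvShortLines max_len t) with hlines
  simp only [PySem.Dict.items_counter, List.foldl_map]
  rw [pv_count_set lines min_repeat]
  -- B side: counts.getD ln 0 = count ln lines for ln ∈ lines
  apply PySem.List.foldl_congr_mem
  intro st ln hln
  have hsorted : (PySem.List.sorted lines (fun x => x) false).Pairwise (· ≤ ·) :=
    PySem.List.sorted_pairwise lines (fun x => x)
  have hperm : (PySem.List.sorted lines (fun x => x) false).Perm lines :=
    PySem.List.sorted_perm lines (fun x => x) false
  have hmem : ln ∈ PySem.List.sorted lines (fun x => x) false :=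
    (PySem.List.mem_sorted lines (fun x => x) false ln).mpr hln
  rw [pv_countRuns_getD _ hsorted 0 PySem.Dict.empty ln, List.drop_zero, if_pos hmem,
    hperm.count_eq]
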